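-- pv_equiv track=rewrite | github.com/sornas/aoc | 20/py/d21.py | pt1
-- ===== SOURCE A (Python) =====
-- import itertools
-- from collections import defaultdict
--
-- def ingredients(line):
--     return line[:line.find(" (")].split(" ")
--
-- def allergens(line):
--     return line[line.find(" (contains ")+len(" (contains "):-2].split(", ")
--
-- def pt1(_in):
--     all_ingredients = list(itertools.chain.from_iterable(ingredients(line) for line in _in))
--
--     might_be = defaultdict(lambda: set(all_ingredients))
--     for line in _in:
--         for alg in allergens(line):
--             might_be[alg] &= set(ingredients(line))
--     return sum(all_ingredients.count(ing)
--                for ing in set(all_ingredients) - set.union(*might_be.values()))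
-- ===== SOURCE B (Python) =====
-- def ingredients(line):
--     return line[:line.find(" (")].split(" ")
--
-- def allergens(line):
--     return line[line.find(" (contains ")+len(" (contains "):-2].split(", ")
--
-- def pt1(_in):
--     all_ingredients = [ing for line in _in for ing in ingredients(line)]
--
--     # one pass: per allergen, how many lines mention it and how often each
--     # ingredient co-occurs with it (counted once per mention)
--     line_count = {}
--     cooccur = {}
--     for line in _in:
--         ings = set(ingredients(line))
--         for alg in allergens(line):
--             line_count[alg] = line_count.get(alg, 0) + 1
--             c = cooccur.setdefault(alg, {})
--             for ing in ings:
--                 c[ing] = c.get(ing, 0) + 1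
--
--     # candidate ingredients for an allergen: present in every mentioning line
--     candidate_sets = [{ing for ing, n in cooccur[alg].items() if n == line_count[alg]}
--                      for alg in line_count]
--     unsafe = set.union(*candidate_sets)
--
--     counts = {}
--     for ing in all_ingredients:
--         counts[ing] = counts.get(ing, 0) + 1
--     return sum(n for ing, n in counts.items() if ing not in unsafe)
-- ===== Notes on version B (the rewrite author's own statement) =====
-- stated objective: faster
-- what changed: A's repeated per-line set intersections and quadratic all_ingredients.count scan are replaced by one counting pass (per-allergen line counts plus co-occurrence counters, candidates = ingredients whose co-occurrence count equals the allergen's line count) and a single ingredient Counter dict.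
import Mathlib
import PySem

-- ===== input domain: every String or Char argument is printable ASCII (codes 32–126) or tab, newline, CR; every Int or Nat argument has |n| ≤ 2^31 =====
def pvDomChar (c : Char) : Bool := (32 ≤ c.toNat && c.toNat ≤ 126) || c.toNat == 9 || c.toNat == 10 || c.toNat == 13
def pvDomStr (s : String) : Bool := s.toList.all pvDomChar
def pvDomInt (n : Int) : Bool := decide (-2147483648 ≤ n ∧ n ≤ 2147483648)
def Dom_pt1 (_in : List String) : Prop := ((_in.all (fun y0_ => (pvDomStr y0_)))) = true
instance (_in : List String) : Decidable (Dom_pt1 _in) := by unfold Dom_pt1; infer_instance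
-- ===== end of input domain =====

-- B replaces A's repeated set intersections and quadratic list.count with one counting pass
-- (per-allergen line counts and co-occurrence counters, plus an ingredient counter).

-- shared helpers of the module: ingredients(line) and allergens(line)
-- s.split(sep) for a nonempty literal sep, via PySem.Chars.splitOn (exact for sep ≠ "")
def pySplit (s sep : String) : List String :=
  (PySem.Chars.splitOn s.toList sep.toList).map String.ofList

def pyIngredients (line : String) : List String :=
  pySplit (PySem.Str.slice line none (some (PySem.Str.find line " ("))) " "

def pyAllergens (line : String) : List String :=
  pySplit (PySem.Str.slice line (some (PySem.Str.find line " (contains " + 11)) (some (-2))) ", "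

-- ===== PORT A =====
def pt1 (_in : List String) : Int :=
  let all_ingredients := _in.flatMap (fun line => pyIngredients line)
  let might_be : PySem.Dict String (PySem.Set String) :=
    _in.foldl (fun d line =>
      (pyAllergens line).foldl (fun d alg =>
        d.insert alg (PySem.Set.inter (d.getD alg (PySem.Set.ofList all_ingredients))
                                      (PySem.Set.ofList (pyIngredients line)))) d)
      PySem.Dict.empty
  match might_be.values with
  | [] => 0   -- Python: set.union() with no arguments raises TypeError here (excluded by Pre_pt1)
  | v :: vs =>
    ((PySem.Set.diff (PySem.Set.ofList all_ingredients) (vs.foldl PySem.Set.union v)).map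
      (fun ing => (all_ingredients.count ing : Int))).sum

-- ===== PORT B =====
def pt1_alt (_in : List String) : Int :=
  let all_ingredients := _in.flatMap (fun line => pyIngredients line)
  let st :=
    _in.foldl (fun (st : PySem.Dict String Int × PySem.Dict String (PySem.Dict String Int)) line =>
      let ings := PySem.Set.ofList (pyIngredients line)
      (pyAllergens line).foldl (fun st alg =>
        (st.1.insert alg (st.1.getD alg 0 + 1),
         st.2.insert alg (ings.foldl (fun c ing => c.insert ing (c.getD ing 0 + 1))
                            (st.2.getD alg PySem.Dict.empty)))) st)
      (PySem.Dict.empty, PySem.Dict.empty)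
  let candidateSets := st.1.keys.map (fun alg =>
    PySem.Set.ofList (((st.2.getD alg PySem.Dict.empty).items.filter
        (fun p => p.2 == st.1.getD alg 0)).map (fun p => p.1)))
  match candidateSets with
  | [] => 0   -- Python: set.union() with no arguments raises TypeError here (excluded by Pre_pt1)
  | v :: vs =>
    let counts := all_ingredients.foldl (fun d ing => d.insert ing (d.getD ing 0 + 1)) PySem.Dict.empty
    ((counts.items.filter (fun p => !(PySem.Set.contains (vs.foldl PySem.Set.union v) p.1))).map
      (fun p => p.2)).sum

-- ===== PRECONDITION & SPEC =====
-- Pre_ excludes only the empty input, on which the Python A (and B) raise TypeError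
def Pre_pt1 (_in : List String) : Prop := _in ≠ []
instance (_in : List String) : Decidable (Pre_pt1 _in) := by unfold Pre_pt1; infer_instance
def pvWitness_pt1 : List String := ["a b (contains x)"]

def Spec_pt1 (_in : List String) (out : Int) : Prop := out = pt1_alt _in
instance (_in : List String) (out : Int) : Decidable (Spec_pt1 _in out) := by unfold Spec_pt1; infer_instance

-- ===== CLAIM (what is proved, stated in full; the proofs are below) =====
def Claim_equal_pt1 : Prop := ∀ (_in : List String), Dom_pt1 _in → Pre_pt1 _in → Spec_pt1 _in (pt1 _in)

-- ===== LEMMAS AND PROOFS =====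

-- the sequence of (allergen, line) update events both loops process
def occsOf (_in : List String) : List (String × String) :=
  _in.flatMap (fun line => (pyAllergens line).map (fun a => (a, line)))

lemma foldl_flatMap' {α β σ : Type} (l : List α) (g : α → List β) (f : σ → β → σ) (i : σ) :
    (l.flatMap g).foldl f i = l.foldl (fun acc x => (g x).foldl f acc) i := by
  induction l generalizing i with
  | nil => rfl
  | cons a l ih => simp [List.foldl_append, ih]

lemma mem_foldl_union {α : Type} [BEq α] [LawfulBEq α]
    (l : List (PySem.Set α)) (s : PySem.Set α) (x : α) :
    x ∈ l.foldl PySem.Set.union s ↔ x ∈ s ∨ ∃ t ∈ l, x ∈ t := by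
  induction l generalizing s with
  | nil => simp
  | cons a l ih => simp [ih, PySem.Set.mem_union, or_assoc]

lemma countP_and_eq_iff {α : Type} (p q : α → Bool) (l : List α) :
    (l.countP (fun x => p x && q x) = l.countP p) ↔ ∀ x ∈ l, p x → q x := by
  induction l with
  | nil => simp
  | cons a l ih =>
    have hle : l.countP (fun x => p x && q x) ≤ l.countP p :=
      List.countP_mono_left (by intro x _ h; exact (Bool.and_elim_left h))
    by_cases hp : p a = true <;> by_cases hq : q a = true <;>
      · simp [hp, hq, ih]
        try omega

-- count of b in a concatenation of duplicate-free blocks = number of blocks containing b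
lemma count_flatMap_nodup {α β : Type} [DecidableEq β] (l : List α) (g : α → List β)
    (h : ∀ x, (g x).Nodup) (b : β) :
    (l.flatMap g).count b = l.countP (fun x => decide (b ∈ g x)) := by
  induction l with
  | nil => rfl
  | cons a l ih =>
    by_cases hb : b ∈ g a
    · simp [List.count_append, ih, hb, List.count_eq_one_of_mem (h a) hb]
      omega
    · simp [List.count_append, ih, hb, List.count_eq_zero_of_not_mem hb]

-- the condition an ingredient must satisfy to stay in might_be[alg] (A's intersections)
def condA (l : List (String × String)) (alg i : String) : Bool :=
  l.all (fun p => !(p.1 == alg) || (PySem.Set.ofList (pyIngredients p.2)).contains i)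

lemma A_inv (l : List (String × String)) (d : PySem.Dict String (PySem.Set String))
    (dflt : PySem.Set String) (alg : String) :
    (l.foldl (fun d p => d.insert p.1 (PySem.Set.inter (d.getD p.1 dflt)
        (PySem.Set.ofList (pyIngredients p.2)))) d).getD alg dflt
      = (d.getD alg dflt).filter (fun i => condA l alg i) := by
  induction l generalizing d with
  | nil => simp [condA]
  | cons p l ih =>
    simp only [List.foldl_cons, ih, PySem.Dict.getD_insert]
    by_cases h : alg = p.1
    · subst h
      rw [if_pos rfl]
      simp only [PySem.Set.inter, List.filter_filter]
      refine List.filter_congr (fun x _ => ?_)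
      cases hc : (PySem.Set.ofList (pyIngredients p.2)).contains x <;>
        simp only [condA, List.all_cons, hc, BEq.rfl, Bool.not_true, Bool.false_or,
          Bool.and_false, Bool.false_and, Bool.and_true, Bool.true_and]
    · rw [if_neg h]
      refine List.filter_congr (fun x _ => ?_)
      have hb : (p.1 == alg) = false := by simp [Ne.symm h]
      simp only [condA, List.all_cons, hb, Bool.not_false, Bool.true_or, Bool.true_and]

def innerC (p : String × String) (c : PySem.Dict String Int) : PySem.Dict String Int :=
  (PySem.Set.ofList (pyIngredients p.2)).foldl (fun c ing => c.insert ing (c.getD ing 0 + 1)) c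

lemma B_inv (l : List (String × String)) (d : PySem.Dict String (PySem.Dict String Int))
    (alg : String) :
    (l.foldl (fun d p => d.insert p.1 (innerC p (d.getD p.1 PySem.Dict.empty))) d).getD alg PySem.Dict.empty
      = (l.filter (fun p => p.1 == alg)).foldl (fun c p => innerC p c) (d.getD alg PySem.Dict.empty) := by
  induction l generalizing d with
  | nil => rfl
  | cons p l ih =>
    simp only [List.foldl_cons, ih, PySem.Dict.getD_insert, List.filter_cons]
    by_cases h : p.1 = alg
    · simp [h]
    · simp [h, Ne.symm h]

lemma foldl_occs {σ : Type} (_in : List String) (F : σ → String → String → σ) (init : σ) :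
    _in.foldl (fun d line => (pyAllergens line).foldl (fun d alg => F d alg line) d) init
      = (occsOf _in).foldl (fun d p => F d p.1 p.2) init := by
  unfold occsOf
  rw [foldl_flatMap']
  simp [List.foldl_map]

-- abbreviations used by the equivalence proof
def allIng (_in : List String) : List String := _in.flatMap (fun line => pyIngredients line)
def keysK (_in : List String) : List String := PySem.Set.ofList ((occsOf _in).map Prod.fst)
-- A's per-allergen candidate set (might_be[alg])
def gA (_in : List String) (k : String) : PySem.Set String :=
  (PySem.Set.ofList (allIng _in)).filter (fun i => condA (occsOf _in) k i)
-- B's per-allergen candidate set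
def Lalg (_in : List String) (k : String) : List String :=
  ((occsOf _in).filter (fun p => p.1 == k)).flatMap (fun p => PySem.Set.ofList (pyIngredients p.2))
def gB (_in : List String) (k : String) : PySem.Set String :=
  PySem.Set.ofList
    ((((Lalg _in k).foldl (fun c ing => c.insert ing (c.getD ing 0 + 1)) PySem.Dict.empty).items.filter
        (fun p => p.2 == ((((occsOf _in).map Prod.fst).count k : Nat) : Int))).map (fun p => p.1))

lemma pt1_char (_in : List String) :
    pt1 _in = (match (keysK _in).map (gA _in) with
      | [] => 0
      | v :: vs =>
        ((PySem.Set.diff (PySem.Set.ofList (allIng _in)) (vs.foldl PySem.Set.union v)).map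
          (fun ing => ((allIng _in).count ing : Int))).sum) := by
  unfold pt1
  dsimp only
  have hstep := foldl_occs _in (fun d alg line => d.insert alg
    (PySem.Set.inter (d.getD alg (PySem.Set.ofList (_in.flatMap (fun line => pyIngredients line))))
      (PySem.Set.ofList (pyIngredients line)))) PySem.Dict.empty
  beta_reduce at hstep
  rw [hstep]
  have hkeys : ((occsOf _in).foldl (fun d p => d.insert p.1
      (PySem.Set.inter (d.getD p.1 (PySem.Set.ofList (_in.flatMap (fun line => pyIngredients line))))
        (PySem.Set.ofList (pyIngredients p.2)))) PySem.Dict.empty).keys = keysK _in := by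
    rw [PySem.Dict.keys_foldl_insert_key (occsOf _in) Prod.fst
      (fun d p => PySem.Set.inter (d.getD p.1 (PySem.Set.ofList (_in.flatMap (fun line => pyIngredients line))))
        (PySem.Set.ofList (pyIngredients p.2))) PySem.Dict.empty]
    simp [keysK, PySem.Set.update_nil_left]
  have hvals : ((occsOf _in).foldl (fun d p => d.insert p.1
      (PySem.Set.inter (d.getD p.1 (PySem.Set.ofList (_in.flatMap (fun line => pyIngredients line))))
        (PySem.Set.ofList (pyIngredients p.2)))) PySem.Dict.empty).values
      = (keysK _in).map (gA _in) := by
    rw [PySem.Dict.values, PySem.Dict.items_eq_map_keys _ (by rw [hkeys]; exact PySem.Set.nodup_ofList _)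
      (PySem.Set.ofList (_in.flatMap (fun line => pyIngredients line))), hkeys, List.map_map]
    refine List.map_congr_left (fun k _ => ?_)
    simp only [Function.comp, A_inv, PySem.Dict.getD_empty, gA, allIng]
  rw [hvals]
  rfl

lemma pt1_alt_char (_in : List String) :
    pt1_alt _in = (match (keysK _in).map (gB _in) with
      | [] => 0
      | v :: vs =>
        (((PySem.Dict.counter (allIng _in)).items.filter
            (fun p => !(PySem.Set.contains (vs.foldl PySem.Set.union v) p.1))).map
          (fun p => p.2)).sum) := by
  unfold pt1_alt
  dsimp only
  have hstep := foldl_occs _in (fun (st : PySem.Dict String Int × PySem.Dict String (PySem.Dict String Int)) alg line =>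
      (st.1.insert alg (st.1.getD alg 0 + 1),
       st.2.insert alg ((PySem.Set.ofList (pyIngredients line)).foldl
          (fun c ing => c.insert ing (c.getD ing 0 + 1)) (st.2.getD alg PySem.Dict.empty))))
    (PySem.Dict.empty, PySem.Dict.empty)
  beta_reduce at hstep
  rw [hstep]
  have hprod := PySem.List.foldl_prod_mk
    (f := fun (d : PySem.Dict String Int) (p : String × String) => d.insert p.1 (d.getD p.1 0 + 1))
    (g := fun (d : PySem.Dict String (PySem.Dict String Int)) (p : String × String) =>
      d.insert p.1 ((PySem.Set.ofList (pyIngredients p.2)).foldl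
        (fun c ing => c.insert ing (c.getD ing 0 + 1)) (d.getD p.1 PySem.Dict.empty)))
    (occsOf _in) PySem.Dict.empty PySem.Dict.empty
  beta_reduce at hprod
  rw [hprod]
  dsimp only
  have hkeys : ((occsOf _in).foldl (fun (d : PySem.Dict String Int) p => d.insert p.1 (d.getD p.1 0 + 1))
      PySem.Dict.empty).keys = keysK _in := by
    rw [PySem.Dict.keys_foldl_insert_key (occsOf _in) Prod.fst
      (fun d p => d.getD p.1 0 + 1) PySem.Dict.empty]
    simp [keysK, PySem.Set.update_nil_left]
  have hlc : ∀ k, ((occsOf _in).foldl (fun (d : PySem.Dict String Int) p => d.insert p.1 (d.getD p.1 0 + 1))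
      PySem.Dict.empty).getD k 0 = ((((occsOf _in).map Prod.fst).count k : Nat) : Int) := by
    intro k
    have hm := List.foldl_map (f := (Prod.fst : String × String → String))
      (g := fun (d : PySem.Dict String Int) x => d.insert x (d.getD x 0 + 1))
      (l := occsOf _in) (init := (PySem.Dict.empty : PySem.Dict String Int))
    beta_reduce at hm
    rw [← hm, PySem.Dict.getD_foldl_insert_add_one, PySem.Dict.getD_empty, zero_add]
  have hco : ∀ k, ((occsOf _in).foldl (fun (d : PySem.Dict String (PySem.Dict String Int)) p =>
      d.insert p.1 ((PySem.Set.ofList (pyIngredients p.2)).foldl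
        (fun c ing => c.insert ing (c.getD ing 0 + 1)) (d.getD p.1 PySem.Dict.empty)))
      PySem.Dict.empty).getD k PySem.Dict.empty
      = (Lalg _in k).foldl (fun c ing => c.insert ing (c.getD ing 0 + 1)) PySem.Dict.empty := by
    intro k
    have hB := B_inv (occsOf _in) PySem.Dict.empty k
    simp only [innerC] at hB
    rw [hB, PySem.Dict.getD_empty, Lalg, foldl_flatMap']
  rw [hkeys]
  rw [List.map_congr_left (fun k _ => by rw [hco k, hlc k]; rfl :
    ∀ k ∈ keysK _in, _ = gB _in k)]
  rw [PySem.Dict.foldl_insert_getD_add_one_eq_counter]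
  rfl

lemma mem_gA (_in : List String) (k i : String) :
    i ∈ gA _in k ↔ i ∈ PySem.Set.ofList (allIng _in) ∧ condA (occsOf _in) k i = true := by
  simp [gA, List.mem_filter]

lemma mem_gB (_in : List String) (k i : String) (hk : k ∈ keysK _in) :
    i ∈ gB _in k ↔ condA (occsOf _in) k i = true := by
  have hkeysc : ((Lalg _in k).foldl (fun (c : PySem.Dict String Int) ing => c.insert ing (c.getD ing 0 + 1))
      PySem.Dict.empty).keys = PySem.Set.ofList (Lalg _in k) := by
    rw [PySem.Dict.keys_foldl_insert (Lalg _in k) (fun d x => d.getD x 0 + 1) PySem.Dict.empty]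
    simp [PySem.Set.update_nil_left]
  have hnd : ((Lalg _in k).foldl (fun (c : PySem.Dict String Int) ing => c.insert ing (c.getD ing 0 + 1))
      PySem.Dict.empty).keys.Nodup := by rw [hkeysc]; exact PySem.Set.nodup_ofList _
  have hgd : ∀ j, ((Lalg _in k).foldl (fun (c : PySem.Dict String Int) ing => c.insert ing (c.getD ing 0 + 1))
      PySem.Dict.empty).getD j 0 = (((Lalg _in k).count j : Nat) : Int) := by
    intro j
    rw [PySem.Dict.getD_foldl_insert_add_one, PySem.Dict.getD_empty, zero_add]
  -- count of i in Lalg k = number of k-events whose line mentions i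
  have hcount : ∀ j, (Lalg _in k).count j
      = (occsOf _in).countP (fun p => (p.1 == k) && (PySem.Set.ofList (pyIngredients p.2)).contains j) := by
    intro j
    rw [Lalg, count_flatMap_nodup _ _ (fun p => PySem.Set.nodup_ofList _) j, List.countP_filter]
    refine List.countP_congr (fun p _ => ?_)
    simp [Bool.and_comm]
  have hlcP : (((occsOf _in).map Prod.fst).count k)
      = (occsOf _in).countP (fun p => p.1 == k) := by
    rw [List.count_eq_countP, List.countP_map]; rfl
  have hpos : 0 < (occsOf _in).countP (fun p => p.1 == k) := by
    rw [List.countP_pos_iff]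
    simp only [keysK, PySem.Set.mem_ofList, List.mem_map] at hk
    obtain ⟨p, hp, rfl⟩ := hk
    exact ⟨p, hp, by simp⟩
  have hcond : (condA (occsOf _in) k i = true)
      ↔ ∀ p ∈ occsOf _in, (p.1 == k) = true → ((PySem.Set.ofList (pyIngredients p.2)).contains i) = true := by
    simp only [condA, List.all_eq_true]
    refine forall_congr' (fun p => imp_congr Iff.rfl ?_)
    cases hb : (p.1 == k) <;> simp
  have hget : ∀ j, j ∈ PySem.Set.ofList (Lalg _in k) →
      ((Lalg _in k).foldl (fun (c : PySem.Dict String Int) ing => c.insert ing (c.getD ing 0 + 1)) PySem.Dict.empty).get? j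
        = some ((((Lalg _in k).count j : Nat) : Int)) := by
    intro j hj
    have hjk : j ∈ ((Lalg _in k).foldl (fun (c : PySem.Dict String Int) ing => c.insert ing (c.getD ing 0 + 1)) PySem.Dict.empty).keys := by
      rw [hkeysc]; exact hj
    cases hg : ((Lalg _in k).foldl (fun (c : PySem.Dict String Int) ing => c.insert ing (c.getD ing 0 + 1)) PySem.Dict.empty).get? j with
    | none => exact absurd hjk ((PySem.Dict.get?_eq_none_iff_not_mem_keys _ _).1 hg)
    | some v =>
      have := PySem.Dict.getD_of_get?_eq_some _ 0 hg
      rw [hgd j] at this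
      rw [← this]
  constructor
  · intro hi
    simp only [gB, PySem.Set.mem_ofList, List.mem_map, List.mem_filter] at hi
    obtain ⟨pr, ⟨hpr, heq⟩, rfl⟩ := hi
    have h1 : ((Lalg _in k).foldl (fun (c : PySem.Dict String Int) ing => c.insert ing (c.getD ing 0 + 1)) PySem.Dict.empty).getD pr.1 0 = pr.2 :=
      PySem.Dict.getD_of_mem_items _ (by simpa using hpr) hnd 0
    rw [hgd pr.1] at h1
    have hmeq : (occsOf _in).countP (fun p => (p.1 == k) && (PySem.Set.ofList (pyIngredients p.2)).contains pr.1)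
        = (occsOf _in).countP (fun p => p.1 == k) := by
      have h2 := (beq_iff_eq).1 heq
      rw [← h1, hlcP] at h2
      rw [← hcount pr.1]
      exact_mod_cast h2
    rw [hcond]
    exact (countP_and_eq_iff _ _ _).1 hmeq
  · intro hcd
    have hall := hcond.1 hcd
    have hmeq := (countP_and_eq_iff (fun p : String × String => p.1 == k)
      (fun p => (PySem.Set.ofList (pyIngredients p.2)).contains i) (occsOf _in)).2 hall
    have hposm : 0 < (Lalg _in k).count i := by rw [hcount i, hmeq]; exact hpos
    have himem : i ∈ PySem.Set.ofList (Lalg _in k) :=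
      (PySem.Set.mem_ofList _ _).2 (List.count_pos_iff.1 hposm)
    refine (PySem.Set.mem_ofList _ _).2 (List.mem_map.2
      ⟨(i, (((Lalg _in k).count i : Nat) : Int)), List.mem_filter.2 ⟨?_, ?_⟩, rfl⟩)
    · exact PySem.Dict.mem_items_of_get?_eq_some _ (hget i himem)
    · have : (Lalg _in k).count i = ((occsOf _in).map Prod.fst).count k := by
        rw [hcount i, hmeq, hlcP]
      simp [this]

lemma pt1_eq (_in : List String) : pt1 _in = pt1_alt _in := by
  rw [pt1_char, pt1_alt_char]
  cases hK : keysK _in with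
  | nil => simp
  | cons k0 kr =>
    simp only [List.map_cons]
    have hU : ∀ i, i ∈ PySem.Set.ofList (allIng _in) →
        (i ∈ (kr.map (gA _in)).foldl PySem.Set.union (gA _in k0)
          ↔ i ∈ (kr.map (gB _in)).foldl PySem.Set.union (gB _in k0)) := by
      intro i hi
      rw [mem_foldl_union, mem_foldl_union]
      have hiff : ∀ k, k ∈ keysK _in → (i ∈ gA _in k ↔ i ∈ gB _in k) := by
        intro k hk
        rw [mem_gA, mem_gB _in k i hk]
        exact ⟨fun h => h.2, fun h => ⟨hi, h⟩⟩
      constructor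
      · rintro (h | ⟨t, ht, hit⟩)
        · exact Or.inl ((hiff k0 (by rw [hK]; exact List.mem_cons_self)).1 h)
        · obtain ⟨k, hk, rfl⟩ := List.mem_map.1 ht
          exact Or.inr ⟨gB _in k, List.mem_map.2 ⟨k, hk, rfl⟩,
            (hiff k (by rw [hK]; exact List.mem_cons_of_mem _ hk)).1 hit⟩
      · rintro (h | ⟨t, ht, hit⟩)
        · exact Or.inl ((hiff k0 (by rw [hK]; exact List.mem_cons_self)).2 h)
        · obtain ⟨k, hk, rfl⟩ := List.mem_map.1 ht
          exact Or.inr ⟨gA _in k, List.mem_map.2 ⟨k, hk, rfl⟩,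
            (hiff k (by rw [hK]; exact List.mem_cons_of_mem _ hk)).2 hit⟩
    rw [PySem.Dict.items_counter, List.filter_map, List.map_map]
    simp only [PySem.Set.diff]
    refine congrArg List.sum (congrArg _ (List.filter_congr (fun x hx => ?_)))
    have hx' : x ∈ PySem.Set.ofList (allIng _in) := hx
    have := hU x hx'
    simp only [Function.comp]
    cases hA : PySem.Set.contains ((kr.map (gA _in)).foldl PySem.Set.union (gA _in k0)) x <;>
      cases hB : PySem.Set.contains ((kr.map (gB _in)).foldl PySem.Set.union (gB _in k0)) x <;>
        simp_all

-- ===== VERDICT (by name: the statement is the Claim_ definition above) =====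
theorem pt1_spec : Claim_equal_pt1 := by
  intro _in _ _
  exact pt1_eq _in
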